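-- pv_equiv track=rewrite | github.com/Concode0/GSS-Research | src/environments.py | state_id
-- ===== SOURCE A (Python) =====
-- def state_id(state):
--     sid = 0
--     mul = 1
--     for row in state:
--         for cell in row:
--             sid += (cell + 1) * mul  # map -1->0, 0->1, 1->2
--             mul *= 3
--     return sid
-- ===== SOURCE B (Python) =====
-- def state_id(state):
--     # Horner evaluation in reverse: no running multiplier needed.
--     sid = 0
--     for row in reversed([list(r) for r in state]):
--         for cell in reversed(row):
--             sid = sid * 3 + (cell + 1)
--     return sid
-- ===== Notes on version B (the rewrite author's own statement) =====
-- stated objective: alternative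
-- what changed: Replaces the forward pass carrying a running power-of-3 multiplier with a reverse-order Horner evaluation that keeps only the accumulator.
import Mathlib
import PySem

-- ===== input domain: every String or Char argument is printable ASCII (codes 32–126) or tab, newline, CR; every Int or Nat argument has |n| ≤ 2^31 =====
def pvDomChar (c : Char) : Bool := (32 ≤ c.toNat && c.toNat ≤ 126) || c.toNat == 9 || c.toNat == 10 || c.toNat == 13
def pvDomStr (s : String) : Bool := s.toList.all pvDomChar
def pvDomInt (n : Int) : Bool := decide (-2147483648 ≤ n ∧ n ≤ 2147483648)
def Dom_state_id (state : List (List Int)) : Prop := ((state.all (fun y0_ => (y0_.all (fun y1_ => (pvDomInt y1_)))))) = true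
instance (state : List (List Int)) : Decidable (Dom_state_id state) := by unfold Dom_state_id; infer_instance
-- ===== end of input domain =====

-- B replaces A's forward pass with a running multiplier by a reverse-order Horner evaluation (alternative decomposition, same cost).

-- ===== PORT A =====
-- A: forward nested loop carrying state (sid, mul)
def state_id (state : List (List Int)) : Int :=
  (state.foldl (fun (p : Int × Int) row =>
    row.foldl (fun (q : Int × Int) cell => (q.1 + (cell + 1) * q.2, q.2 * 3)) p) (0, 1)).1

-- ===== PORT B =====
-- B: Horner's method over the rows and cells in reverse order, single accumulator
def state_id_alt (state : List (List Int)) : Int :=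
  state.reverse.foldl (fun sid row =>
    row.reverse.foldl (fun s cell => s * 3 + (cell + 1)) sid) 0

-- ===== PRECONDITION & SPEC =====
def Spec_state_id (state : List (List Int)) (out : Int) : Prop := out = state_id_alt state
instance (state : List (List Int)) (out : Int) : Decidable (Spec_state_id state out) := by unfold Spec_state_id; infer_instance

-- ===== CLAIM (what is proved, stated in full; the proofs are below) =====
def Claim_equal_state_id : Prop := ∀ (state : List (List Int)), Dom_state_id state → Spec_state_id state (state_id state)

-- ===== LEMMAS AND PROOFS =====

-- base-3 value of a row, first cell least significant
def rowVal : List Int → Int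
  | [] => 0
  | c :: l => (c + 1) + 3 * rowVal l

def rowLen (l : List Int) : ℕ := l.length

def gridVal : List (List Int) → Int
  | [] => 0
  | r :: rs => rowVal r + (3 : Int) ^ r.length * gridVal rs

theorem hor_foldl (l : List Int) (a : Int) :
    l.reverse.foldl (fun s cell => s * 3 + (cell + 1)) a
      = a * (3 : Int) ^ l.length + rowVal l := by
  induction l generalizing a with
  | nil => simp [rowVal]
  | cons c l ih =>
      simp only [List.reverse_cons, List.foldl_append, List.foldl_cons, List.foldl_nil, ih,
        rowVal, List.length_cons]
      ring

theorem inner_foldl (l : List Int) (s m : Int) :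
    l.foldl (fun (q : Int × Int) cell => (q.1 + (cell + 1) * q.2, q.2 * 3)) (s, m)
      = (s + m * rowVal l, m * (3 : Int) ^ l.length) := by
  induction l generalizing s m with
  | nil => simp [rowVal]
  | cons c l ih =>
      simp only [List.foldl_cons, ih, rowVal, List.length_cons, Prod.mk.injEq]
      constructor <;> ring

theorem outer_foldl (rs : List (List Int)) (s m : Int) :
    rs.foldl (fun (p : Int × Int) row =>
        row.foldl (fun (q : Int × Int) cell => (q.1 + (cell + 1) * q.2, q.2 * 3)) p) (s, m)
      = (s + m * gridVal rs, m * (3 : Int) ^ (rs.map List.length).sum) := by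
  induction rs generalizing s m with
  | nil => simp [gridVal]
  | cons r rs ih =>
      simp only [List.foldl_cons, inner_foldl, ih, gridVal, List.map_cons, List.sum_cons,
        Prod.mk.injEq]
      constructor
      · ring
      · rw [pow_add]; ring

theorem alt_foldl (rs : List (List Int)) (a : Int) :
    rs.reverse.foldl (fun sid row =>
        row.reverse.foldl (fun s cell => s * 3 + (cell + 1)) sid) a
      = a * (3 : Int) ^ (rs.map List.length).sum + gridVal rs := by
  induction rs generalizing a with
  | nil => simp [gridVal]
  | cons r rs ih =>
      rw [List.reverse_cons, List.foldl_append, ih, List.foldl_cons, List.foldl_nil,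
        hor_foldl]
      simp only [gridVal, List.map_cons, List.sum_cons]
      rw [pow_add]; ring

-- ===== VERDICT (by name: the statement is the Claim_ definition above) =====
theorem state_id_spec : Claim_equal_state_id := by
  intro state _
  unfold Spec_state_id state_id state_id_alt
  rw [outer_foldl, alt_foldl]
  simp
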